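-- pv_equiv track=rewrite | github.com/h4mn/skybridge | src/infra/github/github_api_client.py | _detect_pr_labels
-- ===== SOURCE A (Python) =====
-- def _detect_pr_labels(issue_labels: list[str]) -> list[str]:
--     """
--     Detecta labels do PR baseado nas labels do issue.
--
--     Args:
--         issue_labels: Labels do issue
--
--     Returns:
--         Lista de labels para o PR
--     """
--     labels_lower = [l.lower() for l in issue_labels]
--
--     pr_labels = []
--
--     # Mapeamento de labels do issue para labels do PR
--     label_mapping = {
--         "bug": "bug",
--         "fix": "bug",
--         "enhancement": "enhancement",
--         "feature": "enhancement",
--         "documentation": "documentation",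
--         "refactor": "refactor",
--         "test": "testing",
--         "tests": "testing",
--         "performance": "performance",
--         "security": "security",
--     }
--
--     for issue_label in labels_lower:
--         if issue_label in label_mapping:
--             pr_label = label_mapping[issue_label]
--             if pr_label not in pr_labels:
--                 pr_labels.append(pr_label)
--
--     return pr_labels
-- ===== SOURCE B (Python) =====
-- def _detect_pr_labels(issue_labels: list[str]) -> list[str]:
--     label_mapping = {
--         "bug": "bug",
--         "fix": "bug",
--         "enhancement": "enhancement",
--         "feature": "enhancement",
--         "documentation": "documentation",
--         "refactor": "refactor",
--         "test": "testing",
--         "tests": "testing",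
--         "performance": "performance",
--         "security": "security",
--     }
--     # Pass 1: map every label through the table, keeping duplicates.
--     pending = [label_mapping.get(l.lower()) for l in issue_labels]
--     pending = [t for t in pending if t is not None]
--     # Dedup by repeated head-emit-and-filter: take the first pending label,
--     # output it, and filter ALL of its copies out of the remainder.  At most
--     # as many rounds as there are distinct PR labels (7), each O(n).
--     out = []
--     while pending:
--         t = pending[0]
--         out.append(t)
--         pending = [x for x in pending if x != t]
--     return out
-- ===== Notes on version B (the rewrite author's own statement) =====
-- stated objective: alternative
-- what changed: Replaces A's single fused loop (lowercase pass, then per-element map plus an O(k) 'not in' membership scan on the growing accumulator) by a staged map pass followed by dedup-by-repeated-filtering: emit the first pending mapped label and filter all its copies out of the remainder, looping until exhausted; no membership test against the output is ever made.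
import Mathlib
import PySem

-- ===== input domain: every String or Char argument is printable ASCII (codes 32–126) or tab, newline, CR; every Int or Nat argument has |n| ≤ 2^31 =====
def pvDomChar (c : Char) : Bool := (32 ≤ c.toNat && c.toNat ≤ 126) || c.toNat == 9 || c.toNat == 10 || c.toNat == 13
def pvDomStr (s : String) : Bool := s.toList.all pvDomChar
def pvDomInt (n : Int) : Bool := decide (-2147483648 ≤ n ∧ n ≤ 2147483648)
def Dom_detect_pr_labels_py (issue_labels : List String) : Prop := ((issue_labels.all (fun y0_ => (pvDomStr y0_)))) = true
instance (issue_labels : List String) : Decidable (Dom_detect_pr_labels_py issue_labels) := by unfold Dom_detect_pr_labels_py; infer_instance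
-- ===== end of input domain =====

-- ===== PORT A =====
-- B restructures only: a staged map pass + dedup by emit-head-and-filter-its-copies, instead of A's fused loop with a membership scan on the accumulator; same values (objective: alternative).
def pvLabelMapping : PySem.Dict String String :=
  PySem.Dict.ofList [("bug", "bug"), ("fix", "bug"), ("enhancement", "enhancement"),
   ("feature", "enhancement"), ("documentation", "documentation"),
   ("refactor", "refactor"), ("test", "testing"), ("tests", "testing"),
   ("performance", "performance"), ("security", "security")]

def detect_pr_labels_py (issue_labels : List String) : List String :=
  let labels_lower := issue_labels.map PySem.Str.lower
  let pr_labels : List String := []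
  labels_lower.foldl (fun pr_labels issue_label =>
    match PySem.Dict.get? pvLabelMapping issue_label with
    | some pr_label => if pr_labels.contains pr_label then pr_labels else pr_labels ++ [pr_label]
    | none => pr_labels) pr_labels

-- ===== PORT B =====
-- the while loop of Source B: emit the head, filter all its copies from the rest, repeat
def pvEmitFilter : List String → List String
  | [] => []
  | t :: rest => t :: pvEmitFilter (rest.filter (fun x => x != t))
termination_by ls => ls.length
decreasing_by
  simp only [List.length_unattach, List.length_cons]
  exact Nat.lt_succ_of_le (le_trans (List.length_filter_le _ _) (by simp))

def detect_pr_labels_py_alt (issue_labels : List String) : List String :=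
  -- pending = [label_mapping.get(l.lower()) for l in issue_labels]
  let pending : List (Option String) :=
    issue_labels.map (fun l => PySem.Dict.get? pvLabelMapping (PySem.Str.lower l))
  -- pending = [t for t in pending if t is not None]  (keep the payloads)
  let pending : List String := pending.filterMap id
  pvEmitFilter pending

-- ===== PRECONDITION & SPEC =====
def Spec_detect_pr_labels_py (issue_labels : List String) (out : List String) : Prop := out = detect_pr_labels_py_alt issue_labels
instance (issue_labels : List String) (out : List String) : Decidable (Spec_detect_pr_labels_py issue_labels out) := by unfold Spec_detect_pr_labels_py; infer_instance

-- ===== CLAIM =====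
def Claim_equal_detect_pr_labels_py : Prop := ∀ (issue_labels : List String), Dom_detect_pr_labels_py issue_labels → Spec_detect_pr_labels_py issue_labels (detect_pr_labels_py issue_labels)

-- ===== LEMMAS AND PROOFS =====

-- A's loop body on each mapped element is exactly PySem.Set.add on the accumulator.
theorem foldl_match_eq_filterMap_add (ls : List String) (acc : List String) :
    ls.foldl (fun pr_labels issue_label =>
      match PySem.Dict.get? pvLabelMapping issue_label with
      | some pr_label => if pr_labels.contains pr_label then pr_labels else pr_labels ++ [pr_label]
      | none => pr_labels) acc
    = (ls.filterMap (fun l => PySem.Dict.get? pvLabelMapping l)).foldl PySem.Set.add acc := by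
  induction ls generalizing acc with
  | nil => rfl
  | cons x xs ih =>
    cases h : PySem.Dict.get? pvLabelMapping x with
    | none =>
      simp only [List.foldl_cons, List.filterMap_cons, h]
      exact ih acc
    | some p =>
      simp only [List.foldl_cons, List.filterMap_cons, h]
      rw [ih]; rfl

-- first-occurrence accumulator dedup = emit-head-and-filter dedup, relative to an accumulator
theorem foldl_add_eq_emitFilter (ls : List String) (acc : List String) :
    ls.foldl PySem.Set.add acc
      = acc ++ pvEmitFilter (ls.filter (fun x => !acc.contains x)) := by
  induction ls generalizing acc with
  | nil => simp [pvEmitFilter]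
  | cons t xs ih =>
    by_cases h : t ∈ acc
    · have hadd : PySem.Set.add acc t = acc := by simp [PySem.Set.add, List.contains_eq_mem, h]
      have hfc : List.filter (fun x => !acc.contains x) (t :: xs)
          = List.filter (fun x => !acc.contains x) xs := by simp [h]
      rw [List.foldl_cons, hadd, ih, hfc]
    · have hadd : PySem.Set.add acc t = acc ++ [t] := by simp [PySem.Set.add, List.contains_eq_mem, h]
      have hfc : List.filter (fun x => !acc.contains x) (t :: xs)
          = t :: List.filter (fun x => !acc.contains x) xs := by simp [h]
      rw [List.foldl_cons, hadd, ih, hfc]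
      have hpred : List.filter (fun x => !(acc ++ [t]).contains x) xs
          = List.filter (fun x => x != t) (List.filter (fun x => !acc.contains x) xs) := by
        rw [List.filter_filter]
        apply List.filter_congr
        intro x _
        by_cases hx : x = t <;> by_cases ha : x ∈ acc <;>
          simp [hx, ha, List.contains_eq_mem, bne]
      rw [hpred]
      simp [pvEmitFilter]

-- ===== VERDICT =====
theorem detect_pr_labels_py_spec : Claim_equal_detect_pr_labels_py := by
  intro issue_labels _
  unfold Spec_detect_pr_labels_py detect_pr_labels_py detect_pr_labels_py_alt
  simp only [foldl_match_eq_filterMap_add, List.filterMap_map, Function.comp_def]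
  rw [foldl_add_eq_emitFilter]
  simp
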